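-- pv_equiv track=rewrite | github.com/RinusVM/Project-Wetenschappelijk-Programmeren | opdracht4.py | isGeldig
-- ===== SOURCE A (Python) =====
-- def isGeldig(bitstring):
--     geldig = True
--     errors = []
--     lengte = len((bitstring))
--
--     if lengte < 22:
--         geldig = False
--         errors.append("De lengte van de string moet minstens 22 zijn.")
--
--     isBinairy = True
--     for i in bitstring:
--         if i != "0" and i != "1":
--             geldig = False
--             isBinairy = False
--     if isBinairy == False:
--         errors.append("De string bestaat enkel uit de karakters '0' en '1'.")
--
--     if (lengte - 8) % 14 != 0:
--         geldig = False
--         errors.append("De lengte van de string verminderd met 8 moet een veelvoud zijn van 14.")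
--
--     if bitstring[0:4] != "1010":
--         geldig  = False
--         errors.append("De string begint niet met het startsymbool 1010")
--
--     if bitstring[-4:] != "1101":
--         geldig  = False
--         errors.append("De string eindigt niet met het eindsymbool 1101")
--
--     for i in range(len(bitstring)):
--         if bitstring[i:i+3] == "000" or bitstring[i:i+3] == "111":
--             geldig  = False
--             errors.append("Het aantal opeenvolgende 0'en en 1's is groter dan twee.")
--     return geldig
-- ===== SOURCE B (Python) =====
-- def isGeldig(bitstring):
--     n = len(bitstring)
--     if n < 22 or (n - 8) % 14 != 0:
--         return False
--     for c in bitstring: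
--         if c != "0" and c != "1":
--             return False
--     if not bitstring.startswith("1010") or not bitstring.endswith("1101"):
--         return False
--     run, prev = 0, None
--     for c in bitstring:
--         run = run + 1 if c == prev else 1
--         if run >= 3:
--             return False
--         prev = c
--     return True
-- ===== Notes on version B (the rewrite author's own statement) =====
-- stated objective: faster
-- what changed: Replaces the accumulate-a-flag structure with short-circuit early returns, and replaces the sliding three-character substring window scan with a single run-length pass that tracks the length of the current run of equal characters and fails as soon as it reaches three.
import Mathlib
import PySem

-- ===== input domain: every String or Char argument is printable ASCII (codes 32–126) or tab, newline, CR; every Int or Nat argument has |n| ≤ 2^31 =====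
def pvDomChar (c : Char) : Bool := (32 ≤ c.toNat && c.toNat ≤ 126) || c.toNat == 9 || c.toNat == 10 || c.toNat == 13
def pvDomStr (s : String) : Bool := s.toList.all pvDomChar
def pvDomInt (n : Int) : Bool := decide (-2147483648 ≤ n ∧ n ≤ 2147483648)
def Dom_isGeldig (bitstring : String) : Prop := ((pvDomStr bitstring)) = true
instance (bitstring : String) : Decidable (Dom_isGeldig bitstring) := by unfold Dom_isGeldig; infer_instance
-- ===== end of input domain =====

-- B replaces A's accumulated validity flag by short-circuit checks and replaces the
-- sliding 3-character substring window by a run-length pass (idiomatic rewrite).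

-- ===== PORT A =====
def isGeldigCore (s : List Char) : Bool :=
  let lengte := s.length
  let geldig := true
  let geldig := if lengte < 22 then false else geldig
  -- for i in bitstring: a non-binary character clears both geldig and isBinairy
  let p := s.foldl (fun (gb : Bool × Bool) i =>
      if i ≠ '0' ∧ i ≠ '1' then (false, false) else gb) (geldig, true)
  let geldig := p.1
  let geldig := if PySem.Int.mod ((lengte : Int) - 8) 14 ≠ 0 then false else geldig
  let geldig := if PySem.List.slice s (some 0) (some 4) ≠ "1010".toList then false else geldig
  let geldig := if PySem.List.slice s (some (-4)) none ≠ "1101".toList then false else geldig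
  (PySem.List.pyRange 0 (lengte : Int) 1).foldl (fun g i =>
      if PySem.List.slice s (some i) (some (i + 3)) = "000".toList ∨
         PySem.List.slice s (some i) (some (i + 3)) = "111".toList then false else g) geldig

def isGeldig (bitstring : String) : Bool := isGeldigCore bitstring.toList

-- ===== PORT B =====
-- run-length loop of Source B: run = run+1 if c == prev else 1; fail when run reaches 3
def runScan : Option Char → Nat → List Char → Bool
  | _, _, [] => true
  | prev, run, c :: rest =>
    let run := if some c = prev then run + 1 else 1
    if 3 ≤ run then false else runScan (some c) run rest

def isGeldigAltCore (s : List Char) : Bool :=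
  let n := s.length
  if n < 22 ∨ PySem.Int.mod ((n : Int) - 8) 14 ≠ 0 then false
  else if s.any (fun c => c ≠ '0' ∧ c ≠ '1') then false  -- early-return binary check
  else if ¬ PySem.Chars.startswith s "1010".toList ∨ ¬ PySem.Chars.endswith s "1101".toList then
    false
  else runScan none 0 s

def isGeldig_alt (bitstring : String) : Bool := isGeldigAltCore bitstring.toList

-- ===== PRECONDITION & SPEC =====
def Spec_isGeldig (bitstring : String) (out : Bool) : Prop := out = isGeldig_alt bitstring
instance (bitstring : String) (out : Bool) : Decidable (Spec_isGeldig bitstring out) := by unfold Spec_isGeldig; infer_instance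

-- ===== CLAIM (what is proved, stated in full; the proofs are below) =====
def Claim_equal_isGeldig : Prop := ∀ (bitstring : String), Dom_isGeldig bitstring → Spec_isGeldig bitstring (isGeldig bitstring)

-- ===== LEMMAS AND PROOFS =====

-- three consecutive equal characters somewhere in the list
def hasTriple : List Char → Bool
  | a :: b :: c :: t => (a == b && b == c) || hasTriple (b :: c :: t)
  | _ => false

theorem hasTriple_cons_ne (p c : Char) (t : List Char) (h : ¬ p = c) :
    hasTriple (p :: c :: t) = hasTriple (c :: t) := by
  cases t <;> simp [hasTriple, h]

theorem runScan_hasTriple (l : List Char) : ∀ p : Char,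
    (runScan (some p) 1 l = !hasTriple (p :: l)) ∧
    (runScan (some p) 2 l = !hasTriple (p :: p :: l)) := by
  induction l with
  | nil => intro p; constructor <;> simp [runScan, hasTriple]
  | cons c t ih =>
    intro p
    constructor
    · by_cases h : c = p
      · subst h
        simpa [runScan, hasTriple] using (ih c).2
      · have : (some c = some p) = False := by simp [h]
        simp only [runScan, this, if_false]
        have := (ih c).1
        simp only [show (3 ≤ 1) = False by simp, if_false] at this ⊢
        rw [this, hasTriple_cons_ne p c t (fun he => h he.symm)]
    · by_cases h : c = p
      · subst h
        simp [runScan, hasTriple]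
      · have : (some c = some p) = False := by simp [h]
        simp only [runScan, this, if_false]
        have := (ih c).1
        simp only [show (3 ≤ 1) = False by simp, if_false] at this ⊢
        have hpc : (p == c) = false := beq_eq_false_iff_ne.mpr (fun he => h he.symm)
        rw [this, show hasTriple (p :: p :: c :: t) = ((p == c) || hasTriple (p :: c :: t)) by
              simp [hasTriple],
            hasTriple_cons_ne p c t (fun he => h he.symm), hpc]
        simp

theorem runScan_start (l : List Char) : runScan none 0 l = !hasTriple l := by
  cases l with
  | nil => simp [runScan, hasTriple]
  | cons c t =>
    simp only [runScan, show (some c = none) = False by simp, if_false]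
    simpa using (runScan_hasTriple t c).1

theorem runScan_iff (l : List Char) : runScan none 0 l = true ↔ hasTriple l = false := by
  rw [runScan_start]
  cases hasTriple l <;> simp

theorem triple_char (c a b : Char)
    (hc : c = '0' ∨ c = '1') (ha : a = '0' ∨ a = '1') (hb : b = '0' ∨ b = '1') :
    ([c, a, b] = "000".toList ∨ [c, a, b] = "111".toList) ↔ (c = a ∧ a = b) := by
  rcases hc with rfl | rfl <;> rcases ha with rfl | rfl <;> rcases hb with rfl | rfl <;> decide

theorem forall_lt_succ_iff {n : Nat} {Q : Nat → Prop} :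
    (∀ k, k < n + 1 → Q k) ↔ Q 0 ∧ ∀ k, k < n → Q (k + 1) := by
  constructor
  · intro h; exact ⟨h 0 (by omega), fun k hk => h (k + 1) (by omega)⟩
  · rintro ⟨h0, h⟩ k hk
    cases k with
    | zero => exact h0
    | succ k => exact h k (by omega)

theorem windowNat (l : List Char) (hbin : ∀ c ∈ l, c = '0' ∨ c = '1') :
    (∀ k, k < l.length →
        ¬(List.take 3 (List.drop k l) = "000".toList ∨ List.take 3 (List.drop k l) = "111".toList))
      ↔ hasTriple l = false := by
  induction l with
  | nil => simp [hasTriple]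
  | cons c t ih =>
    have hc := hbin c (List.mem_cons_self ..)
    have ht := ih (fun x hx => hbin x (List.mem_cons_of_mem _ hx))
    rw [List.length_cons, forall_lt_succ_iff]
    simp only [List.drop_succ_cons, List.drop_zero]
    rw [ht]
    cases t with
    | nil => simp [hasTriple, show List.take 3 [c] = [c] from rfl]
    | cons a t' =>
      have ha := hbin a (List.mem_cons_of_mem _ (List.mem_cons_self ..))
      cases t' with
      | nil =>
        simp [hasTriple, show List.take 3 [c, a] = [c, a] from rfl]
      | cons b t'' =>
        have hb := hbin b (List.mem_cons_of_mem _ (List.mem_cons_of_mem _ (List.mem_cons_self ..)))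
        rw [show List.take 3 (c :: a :: b :: t'') = [c, a, b] from rfl,
            triple_char c a b hc ha hb,
            show hasTriple (c :: a :: b :: t'')
                = ((c == a && a == b) || hasTriple (a :: b :: t'')) from rfl]
        constructor
        · rintro ⟨hne, hT⟩
          rw [hT]
          have : (c == a && a == b) = false := by
            by_cases h1 : c = a
            · by_cases h2 : a = b
              · exact absurd ⟨h1, h2⟩ hne
              · simp [h2]
            · simp [h1]
          simp [this]
        · intro h
          rw [Bool.or_eq_false_iff] at h
          refine ⟨?_, h.2⟩
          rintro ⟨rfl, rfl⟩
          simp at h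

theorem window_range_iff (s : List Char) :
    (∀ i ∈ PySem.List.pyRange 0 (s.length : Int) 1,
        ¬(PySem.List.slice s (some i) (some (i + 3)) = "000".toList ∨
          PySem.List.slice s (some i) (some (i + 3)) = "111".toList))
      ↔ (∀ k, k < s.length →
        ¬(List.take 3 (List.drop k s) = "000".toList ∨ List.take 3 (List.drop k s) = "111".toList)) := by
  have hsl : ∀ k : Nat, PySem.List.slice s (some ((k : Int))) (some ((k : Int) + 3))
      = List.take 3 (List.drop k s) := by
    intro k
    have h3 : ((k : Int) + 3) = ((k + 3 : Nat) : Int) := by push_cast; ring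
    rw [h3, PySem.List.slice_natCast]
    simp
  constructor
  · intro h k hk
    have hm : (k : Int) ∈ PySem.List.pyRange 0 (s.length : Int) 1 := by
      rw [PySem.List.mem_pyRange_one]
      constructor
      · positivity
      · exact_mod_cast hk
    have := h (k : Int) hm
    rwa [hsl k] at this
  · intro h i hi
    rw [PySem.List.mem_pyRange_one] at hi
    obtain ⟨h0, hlt⟩ := hi
    obtain ⟨k, rfl⟩ := Int.eq_ofNat_of_zero_le h0
    rw [hsl k]
    exact h k (by exact_mod_cast hlt)

theorem foldl_flag_iff {α : Type} (P : α → Prop) [DecidablePred P] (xs : List α) (g : Bool) :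
    xs.foldl (fun g i => if P i then false else g) g = true ↔ (g = true ∧ ∀ i ∈ xs, ¬ P i) := by
  induction xs generalizing g with
  | nil => simp
  | cons c t ih =>
    rw [List.foldl_cons]
    by_cases h : P c
    · rw [if_pos h, ih]
      simp [h]
    · rw [if_neg h, ih]
      simp [h]

theorem foldl_bin_iff (s : List Char) (g b : Bool) :
    (s.foldl (fun (gb : Bool × Bool) i =>
        if i ≠ '0' ∧ i ≠ '1' then (false, false) else gb) (g, b)).1 = true
      ↔ (g = true ∧ ∀ c ∈ s, ¬(c ≠ '0' ∧ c ≠ '1')) := by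
  induction s generalizing g b with
  | nil => simp
  | cons c t ih =>
    rw [List.foldl_cons]
    by_cases h : c ≠ '0' ∧ c ≠ '1'
    · rw [if_pos h, ih]
      simp [h]
    · rw [if_neg h, ih]
      have h' : c = '0' ∨ c = '1' := by tauto
      simp only [List.forall_mem_cons]
      tauto

theorem ite_false_iff {C : Prop} [inst : Decidable C] {g : Bool} :
    (if C then false else g) = true ↔ ¬ C ∧ g = true := by
  split_ifs with h <;> simp [h]

theorem start_iff (s : List Char) :
    PySem.List.slice s (some 0) (some 4) = "1010".toList
      ↔ PySem.Chars.startswith s "1010".toList = true := by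
  rw [PySem.Chars.startswith_iff,
      show (4 : Int) = ((4 : Nat) : Int) by norm_num,
      PySem.List.slice_zero_start, PySem.List.slice_to_natCast]
  constructor
  · intro h
    rw [List.prefix_iff_eq_take, show ("1010".toList).length = 4 from rfl]
    exact h.symm
  · intro h
    have := List.prefix_iff_eq_take.mp h
    rw [show ("1010".toList).length = 4 from rfl] at this
    exact this.symm

theorem end_iff (s : List Char) :
    PySem.List.slice s (some (-4)) none = "1101".toList
      ↔ PySem.Chars.endswith s "1101".toList = true := by
  rw [PySem.Chars.endswith_iff, PySem.List.slice_from_neg_ofNat s 4 (by norm_num)]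
  constructor
  · intro h
    rw [List.suffix_iff_eq_drop, show ("1101".toList).length = 4 from rfl]
    exact h.symm
  · intro h
    have := List.suffix_iff_eq_drop.mp h
    rw [show ("1101".toList).length = 4 from rfl] at this
    exact this.symm

theorem core_eq (s : List Char) : isGeldigCore s = isGeldigAltCore s := by
  rw [Bool.eq_iff_iff]
  simp only [isGeldigCore, isGeldigAltCore]
  rw [foldl_flag_iff]
  simp only [ite_false_iff, foldl_bin_iff, runScan_iff, List.any_eq_true, decide_eq_true_eq,
    and_true]
  constructor
  · rintro ⟨⟨he, hs, hm, h22, hbin⟩, hwin⟩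
    have hbin' : ∀ c ∈ s, c = '0' ∨ c = '1' := fun c hc => by have := hbin c hc; tauto
    refine ⟨by tauto, ?_, ?_, ?_⟩
    · rintro ⟨x, hx, hbad⟩
      exact hbin x hx hbad
    · rw [not_or, not_not, not_not]
      exact ⟨(start_iff s).mp (not_not.mp hs), (end_iff s).mp (not_not.mp he)⟩
    · exact (windowNat s hbin').mp ((window_range_iff s).mp hwin)
  · rintro ⟨h1, h2, h3, h4⟩
    rw [not_or] at h1
    rw [not_or, not_not, not_not] at h3
    have hbin : ∀ c ∈ s, ¬(c ≠ '0' ∧ c ≠ '1') := fun c hc hbad => h2 ⟨c, hc, hbad⟩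
    have hbin' : ∀ c ∈ s, c = '0' ∨ c = '1' := fun c hc => by have := hbin c hc; tauto
    refine ⟨⟨?_, ?_, h1.2, h1.1, hbin⟩, ?_⟩
    · exact not_not.mpr ((end_iff s).mpr h3.2)
    · exact not_not.mpr ((start_iff s).mpr h3.1)
    · exact (window_range_iff s).mpr ((windowNat s hbin').mpr h4)

-- ===== VERDICT (by name: the statement is the Claim_ definition above) =====
theorem isGeldig_spec : Claim_equal_isGeldig := by
  intro bitstring _
  unfold Spec_isGeldig isGeldig isGeldig_alt
  exact core_eq bitstring.toList
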